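-- pv_equiv track=rewrite | github.com/MatLab-Research/OntExtract | shared_services/temporal/temporal_analysis_service.py | _group_similar_contexts
-- ===== SOURCE A (Python) =====
-- from typing import Dict, List, Optional, Tuple, Any
-- from collections import defaultdict, Counter
--
-- def _group_similar_contexts(contexts: List[str]) -> List[str]:
--     """
--     Group similar contexts to avoid redundancy.
--
--     Args:
--         contexts: List of context strings
--
--     Returns:
--         List of representative contexts
--     """
--     if not contexts:
--         return []
--
--     # Simple grouping by common words
--     grouped = defaultdict(list)
--
--     for context in contexts:
--         # Extract key words (excluding common words)
--         words = set(context.lower().split())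
--         common_words = {'the', 'a', 'an', 'is', 'are', 'was', 'were', 'in', 'on', 'at', 'to', 'for', 'of', 'and', 'or'}
--         key_words = words - common_words
--
--         if key_words:
--             # Use first key word as group key
--             key = sorted(key_words)[0]
--             grouped[key].append(context)
--
--     # Select representative from each group
--     representatives = []
--     for group in grouped.values():
--         # Choose the longest context as representative
--         representative = max(group, key=len)
--         representatives.append(representative)
--
--     return representatives[:10]  # Return top 10
-- ===== SOURCE B (Python) =====
-- def _group_similar_contexts(contexts):
--     """Dict-free selection algorithm: key every context once (dropping those
--     with no key words, which never contribute), then repeatedly take the first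
--     keyed context, scan the remaining pairs once to find the longest context
--     sharing its key (keeping the earliest longest) while dropping those
--     same-key pairs, emit it, and continue on what is left; stop after 10
--     emitted representatives, since only the first 10 groups are returned.
--     Correct because each emitted value is exactly the longest (first on ties)
--     member of its key's group, and groups are emitted in key-first-appearance
--     order, as with A's insertion-ordered dict."""
--     stop = {'the', 'a', 'an', 'is', 'are', 'was', 'were', 'in', 'on', 'at',
--             'to', 'for', 'of', 'and', 'or'}
--
--     def key_of(c):
--         ws = [w for w in c.lower().split() if w not in stop]
--         return min(ws) if ws else None
--
--     pairs = [(k, c) for c in contexts if (k := key_of(c)) is not None]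
--     out = []
--     while pairs and len(out) < 10:
--         (k, best), rest = pairs[0], pairs[1:]
--         remaining = []
--         for k2, c2 in rest:
--             if k2 == k:
--                 if len(c2) > len(best):
--                     best = c2
--             else:
--                 remaining.append((k2, c2))
--         out.append(best)
--         pairs = remaining
--     return out
-- ===== Notes on version B (the rewrite author's own statement) =====
-- stated objective: alternative
-- what changed: Replaced A's dict-of-lists grouping followed by a per-group max pass with a dict-free selection algorithm: key every context once (dropping keyless ones), then repeatedly take the first keyed context, scan the remaining pairs once to pick the longest same-key context (earliest on ties) while filtering that group out, emit it, and stop after 10 representatives.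
import Mathlib
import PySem

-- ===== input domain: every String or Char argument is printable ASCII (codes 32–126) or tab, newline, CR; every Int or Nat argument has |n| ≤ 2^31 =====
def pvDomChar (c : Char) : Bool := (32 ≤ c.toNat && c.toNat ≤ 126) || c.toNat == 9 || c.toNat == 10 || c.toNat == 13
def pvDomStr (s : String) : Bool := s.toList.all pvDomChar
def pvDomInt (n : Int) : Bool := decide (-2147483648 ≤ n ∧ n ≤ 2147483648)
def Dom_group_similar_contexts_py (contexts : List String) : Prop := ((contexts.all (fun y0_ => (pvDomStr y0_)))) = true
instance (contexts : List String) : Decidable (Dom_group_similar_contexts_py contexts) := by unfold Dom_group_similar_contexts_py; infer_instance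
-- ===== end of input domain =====

-- B replaces A's dict-of-lists grouping + per-group max pass with a dict-free selection
-- algorithm (repeatedly extract the first keyed context's whole group in one scan);
-- objective: alternative (same result, different algorithm, not claimed faster).

-- the stop-word set literal shared by the two sources
def pvStop : List String :=
  ["the", "a", "an", "is", "are", "was", "were", "in", "on", "at", "to", "for", "of", "and", "or"]

-- ===== PORT A =====
-- max(group, key=len); the "" default is unreachable (groups are nonempty) and only makes the port total
def pvRepA (group : List String) : String :=
  (PySem.List.max? group (fun s => PySem.Str.len s)).getD ""

def group_similar_contexts_py (contexts : List String) : List String :=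
  if contexts = [] then []
  else
    let grouped : PySem.Dict String (List String) :=
      contexts.foldl (fun d context =>
        let words : PySem.Set String :=
          PySem.Set.ofList (PySem.Str.split₀ (PySem.Str.lower context))
        let key_words : PySem.Set String := PySem.Set.diff words pvStop
        match PySem.List.sorted key_words (fun x => x) false with
        | [] => d
        | key :: _ => d.modify key [] (fun g => g ++ [context])) PySem.Dict.empty
    let representatives : List String :=
      grouped.values.foldl (fun acc group => acc ++ [pvRepA group]) []
    PySem.List.slice representatives none (some 10)

-- ===== PORT B =====
-- key_of: min of the non-stop words, None if there are none
def pvKeyB (c : String) : Option String :=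
  PySem.List.min?
    ((PySem.Str.split₀ (PySem.Str.lower c)).filter (fun w => !pvStop.contains w))
    (fun x => x)

-- the single scan of Source B's inner for-loop (running longest + remaining pairs)
def pvScan (k c : String) (rest : List (String × String)) :
    String × List (String × String) :=
  rest.foldl (fun (br : String × List (String × String)) p =>
    if p.1 == k then
      (if PySem.Str.len br.1 < PySem.Str.len p.2 then p.2 else br.1, br.2)
    else (br.1, br.2 ++ [p])) (c, [])

-- cited by pvGo's termination proof: the scan never lengthens the pair list
lemma pvScan_len (k c : String) (rest : List (String × String)) :
    (pvScan k c rest).2.length ≤ rest.length := by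
  unfold pvScan
  suffices h : ∀ (t : List (String × String)) (b : String)
      (r0 : List (String × String)),
      (t.foldl (fun (br : String × List (String × String)) p =>
        if p.1 == k then
          (if PySem.Str.len br.1 < PySem.Str.len p.2 then p.2 else br.1, br.2)
        else (br.1, br.2 ++ [p])) (b, r0)).2.length ≤ r0.length + t.length by
    simpa using h rest c []
  intro t
  induction t with
  | nil => simp
  | cons p t ih =>
    intro b r0
    by_cases h : (p.1 == k) = true
    · simp only [List.foldl_cons, if_pos h]
      have := ih (if PySem.Str.len b < PySem.Str.len p.2 then p.2 else b) r0
      simpa using Nat.le_trans this (by omega)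
    · simp only [List.foldl_cons, if_neg h]
      have := ih b (r0 ++ [p])
      simp only [List.length_append, List.length_cons, List.length_nil] at this ⊢
      omega

-- Source B's while loop: while pairs remain and fewer than 10 outputs, take the
-- first pair, one scan finds the longest same-key context (earliest on ties)
-- and keeps the other pairs, recurse on them with one less output to go
def pvGo : Nat → List (String × String) → List String
  | _, [] => []
  | 0, _ :: _ => []
  | budget + 1, (k, c) :: rest => (pvScan k c rest).1 :: pvGo budget (pvScan k c rest).2
termination_by _ l => l.length
decreasing_by
  have := pvScan_len k c rest
  simp only [List.length_cons]
  omega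

def group_similar_contexts_py_alt (contexts : List String) : List String :=
  let pairs : List (String × String) := contexts.filterMap (fun c =>
    match pvKeyB c with
    | none => none
    | some k => some (k, c))
  pvGo 10 pairs

-- ===== PRECONDITION & SPEC =====
def Spec_group_similar_contexts_py (contexts : List String) (out : List String) : Prop := out = group_similar_contexts_py_alt contexts
instance (contexts : List String) (out : List String) : Decidable (Spec_group_similar_contexts_py contexts out) := by unfold Spec_group_similar_contexts_py; infer_instance

-- ===== CLAIM (what is proved, stated in full; the proofs are below) =====
def Claim_equal_group_similar_contexts_py : Prop := ∀ (contexts : List String), Dom_group_similar_contexts_py contexts → Spec_group_similar_contexts_py contexts (group_similar_contexts_py contexts)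

-- ===== LEMMAS AND PROOFS =====

-- all contexts of L whose key is k, in order
def pvAllWith (k : String) (L : List (Option String × String)) : List String :=
  (L.filter (fun p => p.1 == some k)).map Prod.snd

-- the group decomposition both programs compute: (key, its group) in key-first-appearance order
def pvAGroups : List (Option String × String) → List (String × List String)
  | [] => []
  | (none, _) :: t => pvAGroups t
  | (some k, c) :: t =>
      (k, c :: pvAllWith k t) :: pvAGroups (t.filter (fun p => !(p.1 == some k)))
termination_by l => l.length
decreasing_by
  · simp
  · simp only [List.length_unattach, List.length_cons]
    exact Nat.lt_succ_of_le (le_trans (List.length_filter_le _ _) (by simp))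

-- A's step on the pre-keyed list
def pvStepA' (d : PySem.Dict String (List String)) (p : Option String × String) :
    PySem.Dict String (List String) :=
  match p.1 with
  | none => d
  | some k => d.modify k [] (fun g => g ++ [p.2])

-- which pairs a dict state has not yet absorbed
def pvKeep (d : PySem.Dict String (List String)) (p : Option String × String) : Bool :=
  match p.1 with
  | none => true
  | some k => !(d.contains k)

-- the per-context key of A (head of the sorted set difference) equals B's min over the filtered word list
lemma pv_key_eq (ws : List String) :
    (PySem.List.sorted (PySem.Set.diff (PySem.Set.ofList ws) pvStop) (fun x => x) false).head? =
    PySem.List.min? (ws.filter (fun w => !pvStop.contains w)) (fun x => x) := by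
  have hmem : ∀ x, x ∈ PySem.Set.diff (PySem.Set.ofList ws) pvStop ↔
      x ∈ ws.filter (fun w => !pvStop.contains w) := by
    intro x
    simp [PySem.Set.diff, PySem.Set.contains, List.mem_filter, PySem.Set.mem_ofList]
  cases h1 : PySem.List.sorted (PySem.Set.diff (PySem.Set.ofList ws) pvStop) (fun x => x) false with
  | nil =>
    have hd : PySem.Set.diff (PySem.Set.ofList ws) pvStop = [] :=
      (PySem.List.sorted_eq_nil_iff _ _ _).mp h1
    have hf : ws.filter (fun w => !pvStop.contains w) = [] := by
      rw [List.eq_nil_iff_forall_not_mem]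
      intro x hx
      have hx' := (hmem x).mpr hx
      rw [hd] at hx'
      exact absurd hx' (List.not_mem_nil)
    rw [hf]
    rfl
  | cons m t =>
    have hm : m ∈ ws.filter (fun w => !pvStop.contains w) := by
      refine (hmem m).mp ?_
      rw [← PySem.List.mem_sorted _ (fun x : String => x) false, h1]
      exact List.mem_cons_self
    rcases hmin : PySem.List.min? (ws.filter (fun w => !pvStop.contains w)) (fun x => x) with _ | m2
    · rw [(PySem.List.min?_eq_none_iff _ _).mp hmin] at hm
      exact absurd hm (List.not_mem_nil)
    · have h2 : m2 ∈ PySem.Set.diff (PySem.Set.ofList ws) pvStop :=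
        (hmem m2).mpr (PySem.List.min?_mem hmin)
      have hle1 : m ≤ m2 := PySem.List.key_head_sorted_le _ (fun x : String => x) h1 m2 h2
      have hle2 : m2 ≤ m := PySem.List.min?_isMin hmin m hm
      simp [le_antisymm hle1 hle2]

-- with distinct keys, every entry whose key is k carries the value find? returns
lemma pv_entry_unique (items : List (String × List String)) (k : String)
    (q : String × List String)
    (hnodup : (items.map Prod.fst).Nodup)
    (h : List.find? (fun p => p.1 == k) items = some q) :
    ∀ p ∈ items, p.1 = k → p = q := by
  induction items with
  | nil => simp at h
  | cons a t ih =>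
    rw [List.map_cons, List.nodup_cons] at hnodup
    intro p hp hpk
    by_cases ha : a.1 = k
    · have hq : q = a := by
        rw [List.find?_cons_of_pos (by simpa using ha)] at h
        exact (Option.some_inj.mp h).symm
      rcases List.mem_cons.mp hp with rfl | hp'
      · rw [hq]
      · exact absurd (by rw [ha, ← hpk]; exact List.mem_map_of_mem hp') hnodup.1
    · rw [List.find?_cons_of_neg (by simpa using ha)] at h
      rcases List.mem_cons.mp hp with rfl | hp'
      · exact absurd hpk ha
      · exact ih hnodup.2 h p hp' hpk

-- A's fold over contexts equals the fold of pvStepA' over the pre-keyed list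
lemma pv_fold_keyed (contexts : List String) (d : PySem.Dict String (List String)) :
    contexts.foldl (fun d context =>
      match PySem.List.sorted
          (PySem.Set.diff (PySem.Set.ofList (PySem.Str.split₀ (PySem.Str.lower context))) pvStop)
          (fun x => x) false with
      | [] => d
      | key :: _ => d.modify key [] (fun g => g ++ [context])) d
      = (contexts.map (fun c => (pvKeyB c, c))).foldl pvStepA' d := by
  induction contexts generalizing d with
  | nil => rfl
  | cons c cs ih =>
    simp only [List.map_cons, List.foldl_cons]
    have hk := pv_key_eq (PySem.Str.split₀ (PySem.Str.lower c))
    rcases hs : PySem.List.sorted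
        (PySem.Set.diff (PySem.Set.ofList (PySem.Str.split₀ (PySem.Str.lower c))) pvStop)
        (fun x => x) false with _ | ⟨k, t⟩
    · rw [hs] at hk
      have : pvKeyB c = none := by rw [pvKeyB, ← hk]; rfl
      rw [this]
      exact ih d
    · rw [hs] at hk
      have : pvKeyB c = some k := by rw [pvKeyB, ← hk]; rfl
      rw [this]
      exact ih _

-- the grouping invariant: the dict fold absorbs groups exactly as pvAGroups lists them
lemma pv_inv (L : List (Option String × String)) (d : PySem.Dict String (List String))
    (hnodup : (d.items.map Prod.fst).Nodup) :
    (L.foldl pvStepA' d).items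
      = d.items.map (fun kg => (kg.1, kg.2 ++ pvAllWith kg.1 L))
        ++ pvAGroups (L.filter (pvKeep d)) := by
  induction L generalizing d with
  | nil => simp [pvAllWith, pvAGroups]
  | cons p t ih =>
    rcases p with ⟨k?, c⟩
    rcases k? with _ | k
    · -- key None: skipped everywhere
      simp only [List.foldl_cons, pvStepA']
      rw [ih d hnodup]
      have h2 : (((none : Option String), c) :: t).filter (pvKeep d)
          = ((none : Option String), c) :: t.filter (pvKeep d) := by
        simp [pvKeep]
      rw [h2]
      simp only [pvAGroups]
      congr 1
    · by_cases hc : d.contains k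
      · -- existing key: A appends c to the group; the pair is not kept
        simp only [List.foldl_cons, pvStepA']
        have hfq : ∃ q, List.find? (fun p => p.1 == k) d.items = some q := by
          simp only [PySem.Dict.contains, List.any_eq_true, beq_iff_eq] at hc
          rcases hc with ⟨q, hq, hqk⟩
          rcases hf : List.find? (fun p => p.1 == k) d.items with _ | q'
          · exact absurd hqk (by simpa using List.find?_eq_none.mp hf q hq)
          · exact ⟨q', hf⟩
        obtain ⟨q, hfind⟩ := hfq
        have hq1 : q.1 = k := by simpa using List.find?_some hfind
        have hget : d.getD k [] = q.2 := by
          simp [PySem.Dict.getD, PySem.Dict.get?, hfind]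
        have hmod : d.modify k [] (fun g => g ++ [c])
            = PySem.Dict.mk (d.items.map (fun p => if p.1 == k then (k, q.2 ++ [c]) else p)) := by
          simp only [PySem.Dict.modify, hget, PySem.Dict.insert, hc, if_pos]
        rw [hmod]
        have hkeys : ((d.items.map (fun p => if p.1 == k then (k, q.2 ++ [c]) else p)).map Prod.fst)
            = d.items.map Prod.fst := by
          simp only [List.map_map]
          apply List.map_congr_left
          intro p hp
          by_cases hpk : p.1 = k <;> simp [hpk]
        rw [ih _ (by rw [hkeys]; exact hnodup)]
        have hcon' : ∀ k', (PySem.Dict.mk (d.items.map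
            (fun p => if p.1 == k then (k, q.2 ++ [c]) else p))).contains k' = d.contains k' := by
          intro k'
          simp only [PySem.Dict.contains, List.any_map]
          exact List.any_congr rfl (fun p => by
            by_cases hpk : p.1 = k <;> simp [Function.comp, hpk])
        have hfilter : t.filter (pvKeep (PySem.Dict.mk (d.items.map
            (fun p => if p.1 == k then (k, q.2 ++ [c]) else p))))
            = t.filter (pvKeep d) := by
          apply List.filter_congr
          intro p _
          rcases p with ⟨k?, c'⟩
          rcases k? with _ | k'
          · simp [pvKeep]
          · simp only [pvKeep, hcon']
        have hhead : ((some k, c) :: t).filter (pvKeep d) = t.filter (pvKeep d) := by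
          simp [pvKeep, hc]
        rw [hfilter, hhead]
        congr 1
        simp only [List.map_map]
        apply List.map_congr_left
        intro kg hkg
        by_cases hpk : kg.1 = k
        · have hkq : kg = q := pv_entry_unique d.items k q hnodup hfind kg hkg hpk
          subst hkq
          have hall : pvAllWith k ((some k, c) :: t) = c :: pvAllWith k t := by
            simp [pvAllWith]
          simp [hpk, hall, List.append_assoc]
        · have hall : pvAllWith kg.1 ((some k, c) :: t) = pvAllWith kg.1 t := by
            simp only [pvAllWith, List.filter_cons]
            rw [if_neg (by simp; intro h; exact hpk h.symm)]
          simp [hpk, hall]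
      · -- new key: A appends a fresh entry; this pair starts a new group
        simp only [List.foldl_cons, pvStepA']
        have hget : d.getD k [] = [] := by
          simp only [PySem.Dict.getD, PySem.Dict.get?]
          rcases hf : List.find? (fun p => p.1 == k) d.items with _ | q
          · rw [hf]; rfl
          · refine absurd ?_ hc
            simp only [PySem.Dict.contains, List.any_eq_true]
            refine ⟨q, List.mem_of_find?_eq_some hf, ?_⟩
            have h3 := List.find?_some hf
            simpa using h3
        have hmod : d.modify k [] (fun g => g ++ [c])
            = PySem.Dict.mk (d.items ++ [(k, [c])]) := by
          simp [PySem.Dict.modify, hget, PySem.Dict.insert, hc]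
        rw [hmod]
        have hnomem : k ∉ d.items.map Prod.fst := by
          intro hmem
          rcases List.mem_map.mp hmem with ⟨p, hp, hpk⟩
          refine absurd ?_ hc
          simp only [PySem.Dict.contains, List.any_eq_true]
          exact ⟨p, hp, by simp [hpk]⟩
        have hnodup' : (((d.items ++ [(k, [c])]).map Prod.fst)).Nodup := by
          simp only [List.map_append]
          refine List.Nodup.append hnodup (by simp) ?_
          intro x hx hy
          simp only [List.map_cons, List.map_nil, List.mem_singleton] at hy
          subst hy
          exact hnomem hx
        rw [ih _ hnodup']
        have hcon' : ∀ k', (PySem.Dict.mk (d.items ++ [(k, [c])])).contains k'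
            = (d.contains k' || (k == k')) := by
          intro k'
          simp [PySem.Dict.contains, List.any_append]
        have hhead : ((some k, c) :: t).filter (pvKeep d)
            = (some k, c) :: t.filter (pvKeep d) := by
          simp [pvKeep, hc]
        rw [hhead]
        simp only [pvAGroups]
        have hall : pvAllWith k (t.filter (pvKeep d)) = pvAllWith k t := by
          simp only [pvAllWith, List.filter_filter]
          congr 1
          apply List.filter_congr
          intro p _
          rcases p with ⟨k?, c'⟩
          rcases k? with _ | k'
          · simp
          · by_cases hk' : k' = k
            · subst hk'; simp [pvKeep, hc]
            · simp [hk']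
        have hfilter : (t.filter (pvKeep d)).filter (fun p => !(p.1 == some k))
            = t.filter (pvKeep (PySem.Dict.mk (d.items ++ [(k, [c])]))) := by
          rw [List.filter_filter]
          apply List.filter_congr
          intro p _
          rcases p with ⟨k?, c'⟩
          rcases k? with _ | k'
          · simp [pvKeep]
          · simp only [pvKeep, hcon']
            by_cases hk' : k' = k
            · subst hk'; simp
            · have h1 : (k' == k) = false := by simpa using hk'
              have h2 : (k == k') = false := by simpa using Ne.symm hk'
              simp [h1, h2]
        rw [hall, hfilter]
        simp only [List.map_append, List.append_assoc]
        congr 1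
        · apply List.map_congr_left
          intro kg hkg
          have : pvAllWith kg.1 ((some k, c) :: t) = pvAllWith kg.1 t := by
            have hne : kg.1 ≠ k := fun h => hnomem (h ▸ List.mem_map_of_mem hkg)
            simp only [pvAllWith, List.filter_cons]
            rw [if_neg (by simp; intro h; exact hne h.symm)]
          rw [this]

-- dropping the pairs with no key (which no group ever contains)
def pvStrip (L : List (Option String × String)) : List (String × String) :=
  L.filterMap (fun p =>
    match p.1 with
    | none => none
    | some k => some (k, p.2))

-- the group decomposition on the stripped pair list
def pvBGroups : List (String × String) → List (String × List String)
  | [] => []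
  | (k, c) :: t =>
      (k, c :: (t.filter (fun p => p.1 == k)).map Prod.snd) ::
        pvBGroups (t.filter (fun p => !(p.1 == k)))
termination_by l => l.length
decreasing_by
  simp only [List.length_unattach, List.length_cons]
  exact Nat.lt_succ_of_le (le_trans (List.length_filter_le _ _) (by simp))

-- max(g, key=len) on a nonempty group is the running strict-> longest loop of Source B
lemma pvRepA_cons (c : String) (ws : List String) :
    pvRepA (c :: ws)
      = ws.foldl (fun b w => if PySem.Str.len b < PySem.Str.len w then w else b) c := by
  unfold pvRepA PySem.List.max?
  simp only [List.foldl_cons]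
  induction ws generalizing c with
  | nil => rfl
  | cons w ws ih =>
    simp only [List.foldl_cons]
    rw [show (if PySem.Str.len c < PySem.Str.len w then some w else some c)
        = some (if PySem.Str.len c < PySem.Str.len w then w else c) from (apply_ite some _ _ _).symm]
    exact ih _

-- what the scan computes: the group's longest member and the pairs of other groups
lemma pvScan_eq (k c : String) (t : List (String × String)) :
    pvScan k c t = (pvRepA (c :: (t.filter (fun p => p.1 == k)).map Prod.snd),
      t.filter (fun p => !(p.1 == k))) := by
  unfold pvScan
  suffices h : ∀ (t : List (String × String)) (b : String)
      (r0 : List (String × String)),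
      t.foldl (fun (br : String × List (String × String)) p =>
        if p.1 == k then
          (if PySem.Str.len br.1 < PySem.Str.len p.2 then p.2 else br.1, br.2)
        else (br.1, br.2 ++ [p])) (b, r0)
        = (((t.filter (fun p => p.1 == k)).map Prod.snd).foldl
            (fun b w => if PySem.Str.len b < PySem.Str.len w then w else b) b,
           r0 ++ t.filter (fun p => !(p.1 == k))) by
    rw [h t c []]
    rw [pvRepA_cons]
    simp
  intro t
  induction t with
  | nil => simp
  | cons p t ih =>
    intro b r0
    by_cases h : (p.1 == k) = true
    · simp only [List.foldl_cons, ih, List.filter_cons, h, Bool.not_true]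
      simp
    · simp only [List.foldl_cons, ih, List.filter_cons, h, Bool.not_false]
      simp

-- stripping commutes with keeping the other groups' pairs
lemma pvStrip_filter (k : String) (t : List (Option String × String)) :
    pvStrip (t.filter (fun p => !(p.1 == some k)))
      = (pvStrip t).filter (fun p => !(p.1 == k)) := by
  induction t with
  | nil => rfl
  | cons p t ih =>
    rcases p with ⟨k?, c⟩
    rcases k? with _ | k'
    · simpa [pvStrip, List.filter_cons] using ih
    · by_cases hk : k' = k
      · subst hk
        simpa [pvStrip, List.filter_cons] using ih
      · have h1 : (k' == k) = false := by simpa using hk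
        simp only [pvStrip, List.filter_cons, List.filterMap_cons] at ih ⊢
        simp [h1, ih]

-- stripping preserves each group's members
lemma pvStrip_allWith (k : String) (t : List (Option String × String)) :
    ((pvStrip t).filter (fun p => p.1 == k)).map Prod.snd = pvAllWith k t := by
  induction t with
  | nil => rfl
  | cons p t ih =>
    rcases p with ⟨k?, c⟩
    rcases k? with _ | k'
    · simpa [pvStrip, pvAllWith, List.filter_cons] using ih
    · by_cases hk : k' = k
      · subst hk
        simp only [pvStrip, pvAllWith, List.filterMap_cons, List.filter_cons] at ih ⊢
        simp [ih]
      · have h1 : (k' == k) = false := by simpa using hk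
        have h2 : (some k' == some k) = false := by simpa using hk
        simp only [pvStrip, pvAllWith, List.filterMap_cons, List.filter_cons] at ih ⊢
        simp [h1, h2, ih]

-- the stripped pair list decomposes into the same groups
lemma pvStrip_groups (n : Nat) : ∀ L : List (Option String × String), L.length ≤ n →
    pvBGroups (pvStrip L) = pvAGroups L := by
  induction n with
  | zero =>
    intro L hL
    rw [List.length_eq_zero_iff.mp (Nat.le_zero.mp hL)]
    simp [pvStrip, pvBGroups, pvAGroups]
  | succ n ih =>
    intro L hL
    rcases L with _ | ⟨⟨k?, c⟩, t⟩
    · simp [pvStrip, pvBGroups, pvAGroups]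
    · rcases k? with _ | k
      · rw [pvAGroups]
        rw [show pvStrip (((none : Option String), c) :: t) = pvStrip t from by
          simp [pvStrip]]
        exact ih t (by simpa using Nat.lt_succ_iff.mp (by simpa using hL))
      · rw [pvAGroups]
        rw [show pvStrip ((some k, c) :: t) = (k, c) :: pvStrip t from by
          simp [pvStrip]]
        rw [pvBGroups]
        rw [pvStrip_allWith, ← pvStrip_filter]
        congr 1
        refine ih _ ?_
        have := List.length_filter_le (fun p => !(p.1 == some k)) t
        simp only [List.length_cons] at hL
        omega

-- Source B's while loop emits the longest member of each of the first `budget` groups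
lemma pv_go_eq (n : Nat) : ∀ (budget : Nat) (L : List (String × String)), L.length ≤ n →
    pvGo budget L = ((pvBGroups L).map (fun kg => pvRepA kg.2)).take budget := by
  induction n with
  | zero =>
    intro budget L hL
    rw [List.length_eq_zero_iff.mp (Nat.le_zero.mp hL)]
    simp [pvGo, pvBGroups]
  | succ n ih =>
    intro budget L hL
    rcases L with _ | ⟨⟨k, c⟩, t⟩
    · simp [pvGo, pvBGroups]
    · rcases budget with _ | budget
      · simp [pvGo]
      · rw [pvGo, pvBGroups]
        simp only [pvScan_eq, List.map_cons, List.take_succ_cons]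
        congr 1
        refine ih budget _ ?_
        have := List.length_filter_le (fun p => !(p.1 == k)) t
        simp only [List.length_cons] at hL
        omega

-- ===== VERDICT (by name: the statement is the Claim_ definition above) =====
theorem group_similar_contexts_py_spec : Claim_equal_group_similar_contexts_py := by
  unfold Claim_equal_group_similar_contexts_py
  intro contexts _
  unfold Spec_group_similar_contexts_py
  have hpairs : contexts.filterMap (fun c =>
      match pvKeyB c with
      | none => none
      | some k => some (k, c)) = pvStrip (contexts.map (fun c => (pvKeyB c, c))) := by
    rw [pvStrip, List.filterMap_map]
    rfl
  by_cases hemp : contexts = []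
  · subst hemp
    simp [group_similar_contexts_py, group_similar_contexts_py_alt, pvGo]
  · simp only [group_similar_contexts_py, group_similar_contexts_py_alt, if_neg hemp, hpairs]
    rw [pv_fold_keyed]
    rw [pv_go_eq (pvStrip (contexts.map (fun c => (pvKeyB c, c)))).length _ _ (le_refl _)]
    rw [pvStrip_groups (contexts.map (fun c => (pvKeyB c, c))).length _ (le_refl _)]
    rw [PySem.List.foldl_append_singleton_eq_map]
    rw [PySem.List.slice_to _ (by norm_num : (0:Int) ≤ 10)]
    have hinv := pv_inv (contexts.map (fun c => (pvKeyB c, c))) PySem.Dict.empty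
      (by simp [PySem.Dict.empty])
    have hkeep : (contexts.map (fun c => (pvKeyB c, c))).filter (pvKeep PySem.Dict.empty)
        = contexts.map (fun c => (pvKeyB c, c)) := by
      apply List.filter_eq_self.mpr
      intro p _
      rcases p with ⟨k?, c⟩
      rcases k? with _ | k <;> simp [pvKeep, PySem.Dict.empty, PySem.Dict.contains]
    rw [hkeep] at hinv
    simp only [PySem.Dict.values]
    rw [hinv]
    simp only [PySem.Dict.empty, List.map_nil, List.nil_append, List.map_map]
    rfl
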